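-- pv_equiv track=rewrite | github.com/divyajeettt/sequences | sequences/__init__.py | aronson
-- ===== SOURCE A (Python) =====
-- def check(n: int) -> int:
--     """checks if arg 'n' is a positive int"""
--
--     if not isinstance(n, int):
--         raise TypeError ("'n' must be an int")
--     if n <= 0:
--         raise ValueError ("'n' must be a positive integer")
--     return n
--
-- def aronson(n: int) -> list[int]:
--     """returns the first n terms of the Aronson Sequence
--     Aronson Sequence is defined as:
--         the index of English Letter "T" or "t" in the sentence
--         "T is the first, fourth, eleventh, ... letter in this sentence"
--         ignoring spaces and punctuation marks"""
--
--     sentence = "_tisthefirstfourth"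
--     n, numbers = check(n), list()
--
--     def name(number):
--         """returns the name of an integer"""
--
--         names = {
--             0: "zero", 1: "first", 2: "second", 3: "third", 4: "fourth",
--             5: "fifth", 6: "sixth", 7: "seventh", 8: "eighth", 9: "ninth",
--             11: "eleventh", 12: "twelfth", 13: "thirteenth", 14: "fourteenth",
--             15: "fifteenth", 16: "sixteenth", 17: "seventeenth", 10: "ten",
--             18: "eighteenth", 19: "nineteenth", 30: "thirty", 40: "forty",
--             20: "twenty",  50: "fifty", 60: "sixty", 70: "seventy",
--             80: "eighty", 90: "ninety",
--         }
--         orders = {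
--             **dict.fromkeys([3], ("hundred", 10**2)),
--             **dict.fromkeys([4, 5, 6], ("thousand", 10**3)),
--             **dict.fromkeys([7, 8, 9], ("million", 10**6)),
--             **dict.fromkeys([10, 11, 12], ("billion", 10**9)),
--             **dict.fromkeys([13, 14, 15], ("trillion", 10**12)),
--         }
--
--         order = len(str(number))
--
--         if number in names:
--             return names[number]
--         if order == 2:
--             return f"{name(number // 10*10)}{name(number % 10)}"
--         place, div = orders[order]
--         slash, percent = number // div, number % div
--         if not percent:
--             return f"{name(slash)}{place}"
--         return f"{name(slash)}{place}{name(percent)}"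
--
--     while len(numbers) < n:
--         i = sentence.index("t")
--         numbers.append(i)
--         sentence = sentence.replace("t", "_", 1)
--         if i > 4:
--             sentence += name(i)
--     return numbers
-- ===== SOURCE B (Python) =====
-- # Aronson sequence without any string building: instead of the sentence's characters,
-- # maintain a FIFO queue of the absolute positions of the pending 't's plus the total
-- # length; each appended number-name contributes only its length and its 't'-offsets,
-- # computed arithmetically from small tables (_tinfo), never its actual letters.
--
-- _INFO = {
--     0: (4, []), 1: (5, [4]), 2: (6, []), 3: (5, [0]), 4: (6, [4]),
--     5: (5, [3]), 6: (5, [3]), 7: (7, [5]), 8: (6, [4]), 9: (5, [3]),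
--     11: (8, [6]), 12: (7, [0, 5]), 13: (10, [0, 4, 8]), 14: (10, [4, 8]),
--     15: (9, [3, 7]), 16: (9, [3, 7]), 17: (11, [5, 9]), 10: (3, [0]),
--     18: (10, [4, 8]), 19: (10, [4, 8]), 30: (6, [0, 4]), 40: (5, [3]),
--     20: (6, [0, 4]), 50: (5, [3]), 60: (5, [3]), 70: (7, [5]),
--     80: (6, [4]), 90: (6, [4]),
-- }
-- _ORD = {
--     3: ((7, []), 10**2),
--     4: ((8, [0]), 10**3), 5: ((8, [0]), 10**3), 6: ((8, [0]), 10**3),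
--     7: ((7, []), 10**6), 8: ((7, []), 10**6), 9: ((7, []), 10**6),
--     10: ((7, []), 10**9), 11: ((7, []), 10**9), 12: ((7, []), 10**9),
--     13: ((8, [0]), 10**12), 14: ((8, [0]), 10**12), 15: ((8, [0]), 10**12),
-- }
--
--
-- def _tinfo(number):
--     """(length, offsets of 't') of the English name of `number` (same shape
--     of decomposition as the sentence's name function, but purely numeric)."""
--     if number in _INFO:
--         return _INFO[number]
--     order = len(str(number))
--     if order == 2:
--         l1, o1 = _tinfo(number // 10 * 10)
--         l2, o2 = _tinfo(number % 10)
--         return (l1 + l2, o1 + [l1 + o for o in o2])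
--     (pl, po), div = _ORD[order]
--     slash, percent = divmod(number, div)
--     l1, o1 = _tinfo(slash)
--     if not percent:
--         return (l1 + pl, o1 + [l1 + o for o in po])
--     l2, o2 = _tinfo(percent)
--     return (l1 + pl + l2, o1 + [l1 + o for o in po] + [l1 + pl + o for o in o2])
--
--
-- def aronson(n: int) -> list[int]:
--     if not isinstance(n, int):
--         raise TypeError("'n' must be an int")
--     if n <= 0:
--         raise ValueError("'n' must be a positive integer")
--     init = "_tisthefirstfourth"
--     queue = [k for k, c in enumerate(init) if c == "t"]
--     length = len(init)
--     out = []
--     qi = 0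
--     while len(out) < n:
--         i = queue[qi]
--         qi += 1
--         out.append(i)
--         if i > 4:
--             L, offs = _tinfo(i)
--             queue.extend(length + o for o in offs)
--             length += L
--     return out
-- ===== Notes on version B (the rewrite author's own statement) =====
-- stated objective: faster
-- what changed: B never builds or scans the sentence's characters: it keeps a FIFO queue of absolute positions of pending 't's plus the running sentence length, and each appended number-name contributes only its (length, 't'-offsets) pair computed arithmetically by _tinfo from small numeric tables, replacing A's per-term index('t') rescan plus replace/concatenate string rebuild.
import Mathlib
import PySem

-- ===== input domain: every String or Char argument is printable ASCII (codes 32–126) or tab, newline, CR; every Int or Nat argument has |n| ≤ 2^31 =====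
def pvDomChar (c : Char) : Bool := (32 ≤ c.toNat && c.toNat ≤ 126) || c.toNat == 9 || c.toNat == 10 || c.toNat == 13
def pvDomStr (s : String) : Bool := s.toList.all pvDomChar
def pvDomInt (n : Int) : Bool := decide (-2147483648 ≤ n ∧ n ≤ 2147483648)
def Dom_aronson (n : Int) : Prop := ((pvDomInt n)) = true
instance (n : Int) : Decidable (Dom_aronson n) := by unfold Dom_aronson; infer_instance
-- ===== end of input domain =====

-- B never materialises the sentence: it keeps a queue of pending 't'-positions and the running
-- length, and each appended name contributes only its (length, 't'-offset) pair computed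
-- arithmetically; faster (measured).

-- ===== PORT A =====

-- `name`'s `names` dict, as an association list (lookup = first match)
def pvNames : List (Nat × List Char) :=
  [(0, "zero".toList), (1, "first".toList), (2, "second".toList), (3, "third".toList),
   (4, "fourth".toList), (5, "fifth".toList), (6, "sixth".toList), (7, "seventh".toList),
   (8, "eighth".toList), (9, "ninth".toList), (11, "eleventh".toList), (12, "twelfth".toList),
   (13, "thirteenth".toList), (14, "fourteenth".toList), (15, "fifteenth".toList),
   (16, "sixteenth".toList), (17, "seventeenth".toList), (10, "ten".toList),
   (18, "eighteenth".toList), (19, "nineteenth".toList), (30, "thirty".toList),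
   (40, "forty".toList), (20, "twenty".toList), (50, "fifty".toList), (60, "sixty".toList),
   (70, "seventy".toList), (80, "eighty".toList), (90, "ninety".toList)]

-- `name`'s `orders` dict keyed by len(str(number))
def pvOrders : List (Nat × (List Char × Nat)) :=
  [(3, ("hundred".toList, 100)),
   (4, ("thousand".toList, 1000)), (5, ("thousand".toList, 1000)), (6, ("thousand".toList, 1000)),
   (7, ("million".toList, 1000000)), (8, ("million".toList, 1000000)), (9, ("million".toList, 1000000)),
   (10, ("billion".toList, 1000000000)), (11, ("billion".toList, 1000000000)), (12, ("billion".toList, 1000000000)),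
   (13, ("trillion".toList, 1000000000000)), (14, ("trillion".toList, 1000000000000)), (15, ("trillion".toList, 1000000000000))]

-- the inner recursive `name` helper; the recursion is on a strictly decreasing nonnegative
-- `number`, rendered with fuel `number + 1` (always sufficient); the KeyError path
-- (number ≥ 10^15, unreachable from the loop's calls) yields []
def pyName : Nat → Nat → List Char
  | 0, _ => []
  | f + 1, number =>
    match (pvNames.find? (fun p => p.1 == number)).map Prod.snd with
    | some s => s
    | none =>
      let order := (PySem.Int.toChars (number : Int)).length
      if order = 2 then
        pyName f (number / 10 * 10) ++ pyName f (number % 10)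
      else
        match (pvOrders.find? (fun p => p.1 == order)).map Prod.snd with
        | none => []
        | some (place, div) =>
          let slash := number / div
          let percent := number % div
          if percent = 0 then pyName f slash ++ place
          else pyName f slash ++ place ++ pyName f percent

def pyNameTop (i : Nat) : List Char := pyName (i + 1) i

-- sentence.replace("t", "_", 1); accumulator form so evaluation is tail-recursive
def replaceFirstTGo (acc : List Char) : List Char → List Char
  | [] => acc.reverse
  | c :: cs => if c = 't' then acc.reverse ++ '_' :: cs else replaceFirstTGo (c :: acc) cs

def replaceFirstT (s : List Char) : List Char := replaceFirstTGo [] s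

-- the while-loop of A: fuel = number of remaining terms; sentence.index("t") = findIdx?;
-- Python raises ValueError when no 't' remains (never reached from the start sentence) — acc then
def loopA : Nat → List Char → List Int → List Int
  | 0, _, acc => acc
  | f + 1, s, acc =>
    match s.findIdx? (· == 't') with
    | none => acc
    | some i =>
      let s' := replaceFirstT s
      let s'' := if 4 < i then s' ++ pyNameTop i else s'
      loopA f s'' (acc ++ [(i : Int)])

def aronson (n : Int) : List Int :=
  -- check(n) raises for n ≤ 0 (excluded by Pre_aronson); then exactly n loop iterations
  loopA n.toNat "_tisthefirstfourth".toList []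

-- ===== PORT B =====

-- _INFO: (length, offsets of 't') of each base name
def pvInfo : List (Nat × (Nat × List Nat)) :=
  [(0, (4, [])), (1, (5, [4])), (2, (6, [])), (3, (5, [0])), (4, (6, [4])),
   (5, (5, [3])), (6, (5, [3])), (7, (7, [5])), (8, (6, [4])), (9, (5, [3])),
   (11, (8, [6])), (12, (7, [0, 5])), (13, (10, [0, 4, 8])), (14, (10, [4, 8])),
   (15, (9, [3, 7])), (16, (9, [3, 7])), (17, (11, [5, 9])), (10, (3, [0])),
   (18, (10, [4, 8])), (19, (10, [4, 8])), (30, (6, [0, 4])), (40, (5, [3])),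
   (20, (6, [0, 4])), (50, (5, [3])), (60, (5, [3])), (70, (7, [5])),
   (80, (6, [4])), (90, (6, [4]))]

-- _ORD: ((length, offsets of 't') of the place word, divisor), keyed by len(str(number))
def pvOrdInfo : List (Nat × ((Nat × List Nat) × Nat)) :=
  [(3, ((7, []), 100)),
   (4, ((8, [0]), 1000)), (5, ((8, [0]), 1000)), (6, ((8, [0]), 1000)),
   (7, ((7, []), 1000000)), (8, ((7, []), 1000000)), (9, ((7, []), 1000000)),
   (10, ((7, []), 1000000000)), (11, ((7, []), 1000000000)), (12, ((7, []), 1000000000)),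
   (13, ((8, [0]), 1000000000000)), (14, ((8, [0]), 1000000000000)), (15, ((8, [0]), 1000000000000))]

-- _tinfo: (length, 't'-offsets) of the name of `number`, purely numeric; same fuel rendering
-- as pyName; the KeyError path yields (0, [])
def tinfo : Nat → Nat → Nat × List Nat
  | 0, _ => (0, [])
  | f + 1, number =>
    match (pvInfo.find? (fun p => p.1 == number)).map Prod.snd with
    | some r => r
    | none =>
      let order := (PySem.Int.toChars (number : Int)).length
      if order = 2 then
        let a := tinfo f (number / 10 * 10)
        let b := tinfo f (number % 10)
        (a.1 + b.1, a.2 ++ b.2.map (a.1 + ·))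
      else
        match (pvOrdInfo.find? (fun p => p.1 == order)).map Prod.snd with
        | none => (0, [])
        | some (pw, div) =>
          let slash := number / div
          let percent := number % div
          let a := tinfo f slash
          if percent = 0 then (a.1 + pw.1, a.2 ++ pw.2.map (a.1 + ·))
          else
            let b := tinfo f percent
            (a.1 + pw.1 + b.1, a.2 ++ pw.2.map (a.1 + ·) ++ b.2.map (a.1 + pw.1 + ·))

def tinfoTop (i : Nat) : Nat × List Nat := tinfo (i + 1) i

-- [k for k, c in enumerate(init) if c == "t"]
def tOffs : List Char → List Nat
  | [] => []
  | c :: cs => if c = 't' then 0 :: (tOffs cs).map (· + 1) else (tOffs cs).map (· + 1)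

-- the while-loop of Source B: state = queue of pending 't'-positions, total length so far
def loopB : Nat → List Nat → Nat → List Int → List Int
  | 0, _, _, acc => acc
  | f + 1, queue, len, acc =>
    match queue with
    | [] => acc  -- queue[qi] would raise IndexError (never reached from the start state)
    | i :: rest =>
      if 4 < i then
        let info := tinfoTop i
        loopB f (rest ++ info.2.map (len + ·)) (len + info.1) (acc ++ [(i : Int)])
      else
        loopB f rest len (acc ++ [(i : Int)])

def aronson_alt (n : Int) : List Int :=
  loopB n.toNat (tOffs "_tisthefirstfourth".toList) "_tisthefirstfourth".toList.length []

-- ===== PRECONDITION & SPEC =====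
-- A raises ValueError (via check) for n ≤ 0
def Pre_aronson (n : Int) : Prop := 0 < n
instance (n : Int) : Decidable (Pre_aronson n) := by unfold Pre_aronson; infer_instance
def pvWitness_aronson : Int := (3)

def Spec_aronson (n : Int) (out : List Int) : Prop := out = aronson_alt n
instance (n : Int) (out : List Int) : Decidable (Spec_aronson n out) := by unfold Spec_aronson; infer_instance

-- ===== CLAIM (what is proved, stated in full; the proofs are below) =====
def Claim_equal_aronson : Prop := ∀ (n : Int), Dom_aronson n → Pre_aronson n → Spec_aronson n (aronson n)

-- ===== LEMMAS AND PROOFS =====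

theorem pvInfo_eq : pvInfo = pvNames.map (fun p => (p.1, (p.2.length, tOffs p.2))) := by decide

theorem pvOrdInfo_eq :
    pvOrdInfo = pvOrders.map (fun p => (p.1, ((p.2.1.length, tOffs p.2.1), p.2.2))) := by decide

theorem tOffs_append (a b : List Char) :
    tOffs (a ++ b) = tOffs a ++ (tOffs b).map (· + a.length) := by
  induction a with
  | nil => simp [tOffs]
  | cons c cs ih =>
    by_cases hc : c = 't' <;>
      simp [tOffs, hc, ih, List.map_map, Function.comp_def, Nat.add_assoc]

theorem find?_info (m : Nat) :
    (pvInfo.find? (fun p => p.1 == m)).map Prod.snd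
      = ((pvNames.find? (fun p => p.1 == m)).map Prod.snd).map
          (fun s => (s.length, tOffs s)) := by
  rw [pvInfo_eq, List.find?_map]
  simp [Function.comp_def, Option.map_map]

theorem find?_ord (m : Nat) :
    (pvOrdInfo.find? (fun p => p.1 == m)).map Prod.snd
      = ((pvOrders.find? (fun p => p.1 == m)).map Prod.snd).map
          (fun q => ((q.1.length, tOffs q.1), q.2)) := by
  rw [pvOrdInfo_eq, List.find?_map]
  simp [Function.comp_def, Option.map_map]

theorem tinfo_eq (f : Nat) (number : Nat) :
    tinfo f number = ((pyName f number).length, tOffs (pyName f number)) := by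
  induction f generalizing number with
  | zero => simp [tinfo, pyName, tOffs]
  | succ f ih =>
    rw [tinfo, pyName, find?_info]
    cases hn : (pvNames.find? (fun p => p.1 == number)).map Prod.snd with
    | some s => simp
    | none =>
      simp only [Option.map_none]
      by_cases h2 : (PySem.Int.toChars (number : Int)).length = 2
      · simp [h2, ih, tOffs_append, Nat.add_comm]
      · simp only [h2, if_false, find?_ord]
        cases ho : (pvOrders.find? (fun p => p.1 == (PySem.Int.toChars (number : Int)).length)).map Prod.snd with
        | none => simp [tOffs]
        | some pd =>
          obtain ⟨place, div⟩ := pd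
          by_cases hp : number % div = 0 <;>
            simp [hp, ih, tOffs_append, List.map_map, Function.comp_def,
              Nat.add_comm, Nat.add_assoc, Nat.add_left_comm]

theorem findIdxT_eq_head (s : List Char) :
    s.findIdx? (· == 't') = (tOffs s).head? := by
  induction s with
  | nil => simp [tOffs]
  | cons c cs ih =>
    by_cases hc : c = 't' <;>
      simp [tOffs, List.findIdx?_cons, hc, ih, List.head?_map]

-- proof-only view of replaceFirstT: plain structural recursion
def replF : List Char → List Char
  | [] => []
  | c :: cs => if c = 't' then '_' :: cs else c :: replF cs

theorem replaceFirstTGo_eq (s : List Char) : ∀ acc,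
    replaceFirstTGo acc s = acc.reverse ++ replF s := by
  induction s with
  | nil => intro acc; simp [replaceFirstTGo, replF]
  | cons c cs ih =>
    intro acc
    by_cases hc : c = 't'
    · simp [replaceFirstTGo, replF, hc]
    · simp [replaceFirstTGo, replF, hc, ih (c :: acc)]

theorem replaceFirstT_eq (s : List Char) : replaceFirstT s = replF s := by
  simp [replaceFirstT, replaceFirstTGo_eq]

theorem tOffs_replaceFirstT (s : List Char) :
    tOffs (replaceFirstT s) = (tOffs s).tail := by
  rw [replaceFirstT_eq]
  induction s with
  | nil => simp [tOffs, replF]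
  | cons c cs ih =>
    by_cases hc : c = 't' <;>
      simp [tOffs, replF, hc, ih, List.map_tail]

theorem length_replaceFirstT (s : List Char) :
    (replaceFirstT s).length = s.length := by
  rw [replaceFirstT_eq]
  induction s with
  | nil => rfl
  | cons c cs ih =>
    by_cases hc : c = 't' <;> simp [replF, hc, ih]

theorem loop_eq (f : Nat) : ∀ (s : List Char) (acc : List Int),
    loopA f s acc = loopB f (tOffs s) s.length acc := by
  induction f with
  | zero => intro s acc; rfl
  | succ f ih =>
    intro s acc
    rw [loopA, loopB.eq_def, findIdxT_eq_head]
    cases ht : tOffs s with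
    | nil => rfl
    | cons i rest =>
      simp only [List.head?_cons]
      have hs' : tOffs (replaceFirstT s) = rest := by
        rw [tOffs_replaceFirstT, ht, List.tail_cons]
      have hl : (replaceFirstT s).length = s.length := length_replaceFirstT s
      by_cases h4 : 4 < i
      · simp only [h4, if_true]
        rw [ih, tOffs_append, hs', hl, List.length_append, hl, tinfoTop, tinfo_eq]
        simp [pyNameTop, Nat.add_comm]
      · simp only [h4, if_false]
        rw [ih, hs', hl]

-- ===== VERDICT (by name: the statement is the Claim_ definition above) =====
theorem aronson_spec : Claim_equal_aronson := by
  intro n _ _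
  show aronson n = aronson_alt n
  unfold aronson aronson_alt
  exact loop_eq n.toNat "_tisthefirstfourth".toList []
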